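-- pv_equiv track=rewrite | github.com/purvilmehta06/CSCI-561-Foundations-of-Artificial-Intelligence | Homework 3/homework_v1.py | apply_distributive_law
-- ===== SOURCE A (Python) =====
-- import copy
--
-- def apply_distributive_law(rule, right):
--     final_rule = []
--     rule = rule.replace('~~', '')
--
--     if (not right):
--         temp_rules = []
--         for r in rule.split('|'):
--             if '&' in r:
--                 temp = r.strip().split('&')
--                 temp_rules.append([i.strip() for i in temp])
--             else:
--                 temp_rules.append([r.strip()])
--
--         def make_combinations(temp_rules, temp):
--             if (len(temp) == len(temp_rules)):
--                 final_rule.append(copy.deepcopy(temp))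
--                 return
--             for i in temp_rules[len(temp)]:
--                 temp.append(i)
--                 make_combinations(temp_rules, temp)
--                 temp.pop()
--         make_combinations(temp_rules, [])
--         final_rule = [' | '.join(rule) for rule in final_rule]
--     else:
--         final_rule = [rule.strip() + ' | ' + right for rule in rule.split('&')]
--
--     return final_rule
-- ===== SOURCE B (Python) =====
-- def apply_distributive_law(rule, right):
--     rule = rule.replace('~~', '')
--     if not right:
--         temp_rules = []
--         for r in rule.split('|'):
--             if '&' in r:
--                 temp_rules.append([i.strip() for i in r.strip().split('&')])
--             else:
--                 temp_rules.append([r.strip()])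
--         # iterative Cartesian product (rightmost group varies fastest), no recursion/deepcopy
--         combos = [[]]
--         for group in temp_rules:
--             combos = [c + [i] for c in combos for i in group]
--         return [' | '.join(c) for c in combos]
--     else:
--         return [r.strip() + ' | ' + right for r in rule.split('&')]
-- ===== Notes on version B (the rewrite author's own statement) =====
-- stated objective: simpler
-- what changed: The recursive backtracking make_combinations with its shared accumulator, append/pop and deepcopy is replaced by an iterative Cartesian-product fold (combos = [c + [i] for c in combos for i in group]).
import Mathlib
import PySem

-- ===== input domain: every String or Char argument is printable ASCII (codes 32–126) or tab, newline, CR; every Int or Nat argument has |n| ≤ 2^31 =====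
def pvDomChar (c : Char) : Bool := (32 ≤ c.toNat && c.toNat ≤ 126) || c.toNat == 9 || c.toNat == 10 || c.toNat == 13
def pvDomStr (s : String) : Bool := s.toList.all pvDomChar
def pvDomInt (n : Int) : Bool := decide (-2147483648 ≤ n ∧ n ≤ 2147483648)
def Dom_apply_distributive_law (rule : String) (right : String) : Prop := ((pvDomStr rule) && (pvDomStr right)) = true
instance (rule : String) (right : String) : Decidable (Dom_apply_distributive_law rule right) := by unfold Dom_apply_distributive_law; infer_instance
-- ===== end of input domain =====

-- B replaces A's recursive backtracking (shared accumulator + deepcopy) by an iterative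
-- Cartesian-product fold; same values everywhere (objective: simpler).

-- ===== PORT A =====
-- literal port of A's nested 'make_combinations' recursion (DFS with append/pop);
-- the 'none' arm of the index lookup is unreachable (temp.length ≤ groups.length) and only makes the function total
def pvMkComb (groups : List (List String)) (temp : List String) : List (List String) :=
  if temp.length = groups.length then [temp]
  else
    match h : groups[temp.length]? with
    | none => []
    | some g => g.flatMap (fun i => pvMkComb groups (temp ++ [i]))
termination_by groups.length - temp.length
decreasing_by
  have hlt := (List.getElem?_eq_some_iff.mp h).1
  simp only [List.length_append, List.length_cons, List.length_nil]
  omega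

def apply_distributive_law (rule : String) (right : String) : List String :=
  let rule := PySem.Str.replace rule "~~" ""
  if right = "" then
    let temp_rules : List (List String) :=
      ((PySem.Str.split? rule "|").getD []).foldl (fun acc r =>
        if PySem.Str.isIn "&" r then
          acc ++ [((PySem.Str.split? (PySem.Str.strip r) "&").getD []).map (fun i => PySem.Str.strip i)]
        else acc ++ [[PySem.Str.strip r]]) []
    (pvMkComb temp_rules []).map (fun c => PySem.Str.join " | " c)
  else
    ((PySem.Str.split? rule "&").getD []).map (fun r => PySem.Str.strip r ++ " | " ++ right)

-- ===== PORT B =====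
def apply_distributive_law_alt (rule : String) (right : String) : List String :=
  let rule := PySem.Str.replace rule "~~" ""
  if right = "" then
    let temp_rules : List (List String) :=
      ((PySem.Str.split? rule "|").getD []).foldl (fun acc r =>
        if PySem.Str.isIn "&" r then
          acc ++ [((PySem.Str.split? (PySem.Str.strip r) "&").getD []).map (fun i => PySem.Str.strip i)]
        else acc ++ [[PySem.Str.strip r]]) []
    let combos : List (List String) :=
      temp_rules.foldl (fun cs g => cs.flatMap (fun c => g.map (fun i => c ++ [i]))) [[]]
    combos.map (fun c => PySem.Str.join " | " c)
  else
    ((PySem.Str.split? rule "&").getD []).map (fun r => PySem.Str.strip r ++ " | " ++ right)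

-- ===== PRECONDITION & SPEC =====
def Spec_apply_distributive_law (rule : String) (right : String) (out : List String) : Prop := out = apply_distributive_law_alt rule right
instance (rule : String) (right : String) (out : List String) : Decidable (Spec_apply_distributive_law rule right out) := by unfold Spec_apply_distributive_law; infer_instance

-- ===== CLAIM (what is proved, stated in full; the proofs are below) =====
def Claim_equal_apply_distributive_law : Prop := ∀ (rule : String) (right : String), Dom_apply_distributive_law rule right → Spec_apply_distributive_law rule right (apply_distributive_law rule right)

-- ===== LEMMAS AND PROOFS =====

-- right-recursion characterisation of the Cartesian product
def pvProdR : List (List String) → List (List String)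
  | [] => [[]]
  | g :: gs => g.flatMap (fun i => (pvProdR gs).map (fun c => i :: c))

theorem pvMkComb_eq (groups : List (List String)) (temp : List String)
    (h : temp.length ≤ groups.length) :
    pvMkComb groups temp = (pvProdR (groups.drop temp.length)).map (fun c => temp ++ c) := by
  by_cases he : temp.length = groups.length
  · rw [pvMkComb.eq_def]
    simp [he, List.drop_of_length_le, pvProdR]
  · have hlt : temp.length < groups.length := lt_of_le_of_ne h he
    rw [pvMkComb.eq_def]
    simp only [he, if_false]
    have hget : groups[temp.length]? = some groups[temp.length] := List.getElem?_eq_getElem hlt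
    rw [hget]
    have hdrop : groups.drop temp.length = groups[temp.length] :: groups.drop (temp.length + 1) :=
      List.drop_eq_getElem_cons hlt
    rw [hdrop, pvProdR, List.map_flatMap]
    refine List.flatMap_congr ?_
    intro i _
    have := pvMkComb_eq groups (temp ++ [i]) (by simp; omega)
    rw [this]
    simp [List.map_map]
termination_by groups.length - temp.length
decreasing_by simp; omega

theorem pvFoldl_prod (gs : List (List String)) (acc : List (List String)) :
    gs.foldl (fun cs g => cs.flatMap (fun c => g.map (fun i => c ++ [i]))) acc
      = acc.flatMap (fun c => (pvProdR gs).map (fun d => c ++ d)) := by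
  induction gs generalizing acc with
  | nil => simp [pvProdR]
  | cons g gs ih =>
    rw [List.foldl_cons, ih, pvProdR]
    rw [List.flatMap_assoc]
    refine List.flatMap_congr ?_
    intro c _
    simp only [List.flatMap_map, List.map_flatMap, List.map_map]
    refine List.flatMap_congr ?_
    intro i _
    simp [Function.comp, List.append_assoc]

theorem pvMkComb_eq_foldl (gs : List (List String)) :
    pvMkComb gs []
      = gs.foldl (fun cs g => cs.flatMap (fun c => g.map (fun i => c ++ [i]))) [[]] := by
  rw [pvFoldl_prod, pvMkComb_eq gs [] (by simp)]
  simp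

-- ===== VERDICT (by name: the statement is the Claim_ definition above) =====
theorem apply_distributive_law_spec : Claim_equal_apply_distributive_law := by
  intro rule right _
  unfold Spec_apply_distributive_law apply_distributive_law apply_distributive_law_alt
  by_cases h : right = "" <;> simp [h, pvMkComb_eq_foldl]
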